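-- pv_equiv track=rewrite | github.com/qiyulu437/echo-shield | app/services/ai_score.py | _hit_keywords
-- ===== SOURCE A (Python) =====
-- from typing import Iterable, Sequence, Tuple, List
--
-- def _hit_keywords(text: str, candidates: Iterable[str]) -> List[str]:
--     # return hit words
--     text = text.lower()
--     hits: List[str] = []
--     for k in candidates:
--         k_low = k.lower()
--         if k_low and k_low in text:
--             hits.append(k_low)
--
--     return list(dict.fromkeys(hits))
-- ===== SOURCE B (Python) =====
-- def _hit_keywords(text, candidates):
--     t = text.lower()
--     lows = [k.lower() for k in candidates]
--     lengths = {len(k) for k in lows if k}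
--     # index the text once: every substring of t whose length matches some candidate
--     subs = {t[i:i + L] for L in lengths for i in range(len(t) - L + 1)}
--     seen = set()
--     out = []
--     for k in lows:
--         if k and k in subs and k not in seen:
--             seen.add(k)
--             out.append(k)
--     return out
-- ===== Notes on version B (the rewrite author's own statement) =====
-- stated objective: faster
-- what changed: B builds a substring index of the lowered text once (a hash set of all its substrings whose length matches some candidate length) and answers each candidate by a set lookup with an inline seen-set dedup, instead of A's per-candidate substring scan over the text followed by a trailing dict.fromkeys dedup.
import Mathlib
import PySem

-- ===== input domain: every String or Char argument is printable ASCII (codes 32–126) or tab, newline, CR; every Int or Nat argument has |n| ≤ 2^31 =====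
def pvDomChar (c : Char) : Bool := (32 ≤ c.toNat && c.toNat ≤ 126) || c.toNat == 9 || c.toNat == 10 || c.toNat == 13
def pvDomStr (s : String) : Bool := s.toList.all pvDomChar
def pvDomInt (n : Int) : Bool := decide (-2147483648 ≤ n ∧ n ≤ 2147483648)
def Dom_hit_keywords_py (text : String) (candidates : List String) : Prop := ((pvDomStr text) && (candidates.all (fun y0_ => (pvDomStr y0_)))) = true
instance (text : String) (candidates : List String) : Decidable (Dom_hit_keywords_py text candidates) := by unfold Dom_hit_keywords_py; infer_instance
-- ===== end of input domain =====

-- B indexes the text once — a set of all substrings of the lowered text whose length is a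
-- candidate length — and then answers each candidate by a set lookup with an inline
-- seen-set dedup, instead of A's per-candidate substring scan followed by a final dedup.
-- Same return value; a timing run measured B faster on the generated inputs.

-- ===== PORT A =====
def hit_keywords_py (text : String) (candidates : List String) : List String :=
  let t := PySem.Str.lower text
  let hits : List String := candidates.foldl (fun hits k =>
    let k_low := PySem.Str.lower k
    if !(k_low == "") && PySem.Str.isIn k_low t then hits ++ [k_low] else hits) []
  PySem.List.dedup hits

-- ===== PORT B =====
def hit_keywords_py_alt (text : String) (candidates : List String) : List String :=
  let t := PySem.Str.lower text
  let lows := candidates.map (fun k => PySem.Str.lower k)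
  let lengths : PySem.Set Int :=
    PySem.Set.ofList ((lows.filter (fun k => !(k == ""))).map (fun k => PySem.Str.len k))
  -- set comprehension {t[i:i+L] for L in lengths for i in range(len(t) - L + 1)}
  -- (consumed only by membership tests, so the set's iteration order is irrelevant)
  let subs : PySem.Set String :=
    PySem.Set.ofList (lengths.flatMap (fun L =>
      (PySem.List.pyRange 0 (PySem.Str.len t - L + 1)).map
        (fun i => PySem.Str.slice t (some i) (some (i + L)))))
  (lows.foldl (fun (acc : PySem.Set String × List String) k =>
      if !(k == "") && PySem.Set.contains subs k && !(PySem.Set.contains acc.1 k) then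
        (PySem.Set.add acc.1 k, acc.2 ++ [k])
      else acc) (PySem.Set.empty, [])).2

-- ===== PRECONDITION & SPEC =====
def Spec_hit_keywords_py (text : String) (candidates : List String) (out : List String) : Prop := out = hit_keywords_py_alt text candidates
instance (text : String) (candidates : List String) (out : List String) : Decidable (Spec_hit_keywords_py text candidates out) := by unfold Spec_hit_keywords_py; infer_instance

-- ===== CLAIM (what is proved, stated in full; the proofs are below) =====
def Claim_equal_hit_keywords_py : Prop := ∀ (text : String) (candidates : List String), Dom_hit_keywords_py text candidates → Spec_hit_keywords_py text candidates (hit_keywords_py text candidates)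

-- ===== LEMMAS AND PROOFS =====

-- Set.contains is membership (stated once so the big index term is never unfolded)
theorem pv_contains_iff {s : PySem.Set String} {x : String} :
    PySem.Set.contains s x = true ↔ x ∈ s := by
  simp [PySem.Set.contains]

-- B's loop with the lockstep (seen, out) state: out IS the keep-first dedup fold of the hits
theorem pv_B_loop (p : String → Bool) (l : List String) (o : List String) :
    (l.foldl (fun (acc : PySem.Set String × List String) k =>
        if p k && !(PySem.Set.contains acc.1 k) then
          (PySem.Set.add acc.1 k, acc.2 ++ [k])
        else acc) (o, o)).2
      = (l.filter p).foldl PySem.Set.add o := by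
  induction l generalizing o with
  | nil => simp
  | cons x xs ih =>
    simp only [List.foldl_cons, List.filter_cons]
    cases hp : p x with
    | false => simpa [hp] using ih o
    | true =>
      cases hc : PySem.Set.contains o x with
      | true =>
        have hx : x ∈ o := by simpa [PySem.Set.contains] using hc
        have hadd : PySem.Set.add o x = o := by simp [PySem.Set.add, hx]
        simpa [hp, hc, hadd] using ih o
      | false =>
        have hx : x ∉ o := by simpa [PySem.Set.contains] using hc
        have hadd : PySem.Set.add o x = o ++ [x] := by simp [PySem.Set.add, hx]
        simpa [hp, hc, hadd] using ih (o ++ [x])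

-- membership in B's substring index ↔ Python's 'k in t', for a candidate whose length is indexed
theorem pv_mem_subs_iff (t k : String) (lengths : List Int)
    (hL : ∀ L ∈ lengths, 0 ≤ L) (hk : PySem.Str.len k ∈ lengths) :
    (k ∈ PySem.Set.ofList (lengths.flatMap (fun L =>
        (PySem.List.pyRange 0 (PySem.Str.len t - L + 1)).map
          (fun i => PySem.Str.slice t (some i) (some (i + L))))))
      ↔ PySem.Str.isIn k t = true := by
  rw [PySem.Set.mem_ofList, List.mem_flatMap, PySem.Str.isIn_iff_infix]
  constructor
  · rintro ⟨L, hLmem, hmap⟩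
    rw [List.mem_map] at hmap
    obtain ⟨i, hi, hslice⟩ := hmap
    rw [PySem.List.mem_pyRange_one] at hi
    have h0L : 0 ≤ L := hL L hLmem
    have h0i : (0:Int) ≤ i := hi.1
    have h0iL : (0:Int) ≤ i + L := by omega
    have hkl : k.toList = (t.toList.drop i.toNat).take ((i + L).toNat - i.toNat) := by
      rw [← hslice, PySem.Str.toList_slice, PySem.Chars.slice_eq_listSlice,
        PySem.List.slice_toNat _ h0i h0iL]
    refine ⟨t.toList.take i.toNat, (t.toList.drop i.toNat).drop ((i + L).toNat - i.toNat), ?_⟩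
    rw [hkl, List.append_assoc, List.take_append_drop, List.take_append_drop]
  · rintro ⟨s, e, hse⟩
    refine ⟨PySem.Str.len k, hk, ?_⟩
    rw [List.mem_map]
    refine ⟨(s.length : Int), ?_, ?_⟩
    · rw [PySem.List.mem_pyRange_one]
      have hlen : s.length + k.toList.length + e.length = t.toList.length := by
        have := congrArg List.length hse
        simp only [List.length_append] at this
        omega
      rw [PySem.Str.len_eq, PySem.Str.len_eq]
      omega
    · rw [← String.toList_inj, PySem.Str.toList_slice, PySem.Chars.slice_eq_listSlice,
        PySem.List.slice_toNat _ (by positivity) (by rw [PySem.Str.len_eq]; positivity)]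
      have h1 : ((s.length : Int) + PySem.Str.len k).toNat - ((s.length : Int)).toNat
          = k.toList.length := by
        rw [PySem.Str.len_eq]; omega
      have h2 : t.toList.drop s.length = k.toList ++ e := by
        rw [← hse, List.append_assoc, List.drop_left]
      rw [h1, Int.toNat_natCast, h2, List.take_left]

-- ===== VERDICT (by name: the statement is the Claim_ definition above) =====
theorem hit_keywords_py_spec : Claim_equal_hit_keywords_py := by
  intro text candidates _
  unfold Spec_hit_keywords_py hit_keywords_py hit_keywords_py_alt
  simp only []
  -- A's loop is a filter-map, then dedup
  rw [PySem.List.foldl_append_if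
        (p := fun k => !(PySem.Str.lower k == "") &&
          PySem.Str.isIn (PySem.Str.lower k) (PySem.Str.lower text))
        (f := fun k => PySem.Str.lower k),
      List.nil_append]
  -- B's loop is the keep-first dedup of its own filter
  rw [show (PySem.Set.empty : PySem.Set String) = ([] : List String) from rfl,
    pv_B_loop, ← PySem.Set.ofList_eq_foldl, ← PySem.List.dedup_eq_ofList]
  congr 1
  -- the two filters agree on every lowered candidate, and then filter commutes with map
  have hpq : ∀ k ∈ candidates.map (fun k => PySem.Str.lower k),
      (!(k == "") && PySem.Set.contains
        (PySem.Set.ofList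
          ((PySem.Set.ofList (((candidates.map (fun k => PySem.Str.lower k)).filter
                (fun k => !(k == ""))).map (fun k => PySem.Str.len k))).flatMap (fun L =>
            (PySem.List.pyRange 0 (PySem.Str.len (PySem.Str.lower text) - L + 1)).map
              (fun i => PySem.Str.slice (PySem.Str.lower text) (some i) (some (i + L)))))) k)
        = (!(k == "") && PySem.Str.isIn k (PySem.Str.lower text)) := by
    intro k hkmem
    cases hke : (k == "") with
    | true => simp
    | false =>
      simp only [Bool.not_false, Bool.true_and]
      have hkfil : k ∈ (candidates.map (fun k => PySem.Str.lower k)).filter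
          (fun k => !(k == "")) := List.mem_filter.mpr ⟨hkmem, by simp [hke]⟩
      have hklen : PySem.Str.len k ∈
          ((candidates.map (fun k => PySem.Str.lower k)).filter
            (fun k => !(k == ""))).map (fun k => PySem.Str.len k) :=
        List.mem_map.mpr ⟨k, hkfil, rfl⟩
      have hL : ∀ L ∈ ((candidates.map (fun k => PySem.Str.lower k)).filter
          (fun k => !(k == ""))).map (fun k => PySem.Str.len k), 0 ≤ L := by
        intro L hLm
        obtain ⟨k', _, rfl⟩ := List.mem_map.mp hLm
        rw [PySem.Str.len_eq]; positivity
      have hklen2 := (PySem.Set.mem_ofList _ _).mpr hklen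
      have hL2 : ∀ L ∈ PySem.Set.ofList (((candidates.map (fun k => PySem.Str.lower k)).filter
          (fun k => !(k == ""))).map (fun k => PySem.Str.len k)), 0 ≤ L :=
        fun L hLm => hL L ((PySem.Set.mem_ofList _ _).mp hLm)
      have hiff := pv_mem_subs_iff (PySem.Str.lower text) k _ hL2 hklen2
      cases hin : PySem.Str.isIn k (PySem.Str.lower text) with
      | true =>
        exact pv_contains_iff.mpr (hiff.mpr hin)
      | false =>
        exact Bool.eq_false_iff.mpr
          (fun h => ne_true_of_eq_false hin (hiff.mp (pv_contains_iff.mp h)))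
  rw [List.filter_congr hpq, List.filter_map]
  rfl
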